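-- pv_equiv track=rewrite | github.com/HyeRi95/Practice_Python | 프로그래머스/lv1/12917. 문자열 내림차순으로 배치하기/문자열 내림차순으로 배치하기.py | solution
-- ===== SOURCE A (Python) =====
-- def solution(s):
--     answer =[]
--     s = list(s)
--     for i in s:
--         answer.append(ord(i))
--     answer.sort(reverse=True)
--     answer = list(map(chr,answer))
--     return ''.join(answer)
-- ===== SOURCE B (Python) =====
-- def solution(s):
--     counts = {}
--     for ch in s:
--         c = ord(ch)
--         counts[c] = counts.get(c, 0) + 1
--     out = []
--     for c in range(126, -1, -1):
--         n = counts.get(c, 0)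
--         if n:
--             out.append(chr(c) * n)
--     return ''.join(out)
-- ===== Notes on version B (the rewrite author's own statement) =====
-- stated objective: alternative
-- what changed: Replaces the comparison sort of ord values with a counting sort: one pass builds a frequency table of character codes, then the codes 126..0 are scanned once, emitting each character repeated by its count; no sorted()/sort() call remains.
import Mathlib
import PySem

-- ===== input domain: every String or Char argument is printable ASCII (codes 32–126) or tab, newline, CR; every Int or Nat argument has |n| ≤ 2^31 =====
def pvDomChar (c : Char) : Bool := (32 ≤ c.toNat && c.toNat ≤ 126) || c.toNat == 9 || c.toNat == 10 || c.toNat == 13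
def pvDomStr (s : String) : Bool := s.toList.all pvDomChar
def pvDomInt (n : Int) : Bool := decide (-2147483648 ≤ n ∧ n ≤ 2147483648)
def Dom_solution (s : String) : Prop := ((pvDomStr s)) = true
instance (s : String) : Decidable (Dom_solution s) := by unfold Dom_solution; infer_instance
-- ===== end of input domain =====

-- B replaces A's comparison sort of ord values with a counting sort over the ASCII codes 126..0 (alternative algorithm, same result).


-- ===== PORT A =====
-- answer = [ord(i) for i in s]; answer.sort(reverse=True); return ''.join(map(chr, answer))
def solution (s : String) : String :=
  let answer : List Int := s.toList.foldl (fun acc ch => acc ++ [(ch.toNat : Int)]) []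
  let answer := PySem.List.sorted answer (fun x => x) true
  let answer := answer.map (fun n => Char.ofNat n.toNat)   -- chr(n), exact for 0 ≤ n < 0x110000
  String.mk answer   -- ''.join of single-character strings

-- ===== PORT B =====
-- counting sort: frequency dict of ord values, then scan codes 126..0 emitting chr(c)*count
def solution_alt (s : String) : String :=
  let counts : PySem.Dict Int Int :=
    s.toList.foldl (fun d ch => d.insert ((ch.toNat : Int)) (d.getD ((ch.toNat : Int)) 0 + 1)) PySem.Dict.empty
  let out : List (List Char) :=
    (PySem.List.pyRange 126 (-1) (-1)).foldl
      (fun acc c =>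
        let n := counts.getD c 0
        if n ≠ 0 then acc ++ [List.replicate n.toNat (Char.ofNat c.toNat)] else acc)   -- chr(c)*n
      []
  String.mk out.flatten   -- ''.join

-- ===== PRECONDITION & SPEC =====
def Spec_solution (s : String) (out : String) : Prop := out = solution_alt s
instance (s : String) (out : String) : Decidable (Spec_solution s out) := by unfold Spec_solution; infer_instance

-- ===== CLAIM (what is proved, stated in full; the proofs are below) =====
def Claim_equal_solution : Prop := ∀ (s : String), Dom_solution s → Spec_solution s (solution s)

-- ===== LEMMAS AND PROOFS =====

-- every code 0..126 occurs in B's scan range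
set_option maxRecDepth 40000 in
lemma pvR_mem : ∀ n : Nat, n < 127 → ((n : Int)) ∈ PySem.List.pyRange 126 (-1) (-1) := by decide

-- B's scan range is strictly decreasing
set_option maxRecDepth 40000 in
lemma pvR_sorted : (PySem.List.pyRange 126 (-1) (-1)).Pairwise (fun a b : Int => b < a) := by decide

-- count of v in the concatenation of per-code blocks, for a duplicate-free code list
lemma pvCount_flat (r : List Int) (k : Int → Nat) (hnd : r.Nodup) (v : Int) :
    (r.flatMap (fun c => List.replicate (k c) c)).count v = if v ∈ r then k v else 0 := by
  induction r with
  | nil => simp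
  | cons c t ih =>
    rcases List.nodup_cons.mp hnd with ⟨hc, ht⟩
    simp only [List.flatMap_cons, List.count_append, ih ht, List.count_replicate, List.mem_cons]
    by_cases hv : v = c
    · subst hv; simp [hc]
    · simp [hv, Ne.symm hv]

-- the concatenation of per-code blocks along a strictly decreasing code list is weakly decreasing
lemma pvPairwise_flat (r : List Int) (k : Int → Nat)
    (h : r.Pairwise (fun a b : Int => b < a)) :
    (r.flatMap (fun c => List.replicate (k c) c)).Pairwise (fun a b : Int => b ≤ a) := by
  induction r with
  | nil => simp
  | cons c t ih =>
    rcases List.pairwise_cons.mp h with ⟨hc, ht⟩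
    simp only [List.flatMap_cons]
    refine List.pairwise_append.mpr ⟨?_, ih ht, ?_⟩
    · exact List.pairwise_replicate.mpr (Or.inr le_rfl)
    · intro a ha b hb
      obtain rfl := List.eq_of_mem_replicate ha
      obtain ⟨c', hc', hb'⟩ := List.mem_flatMap.mp hb
      obtain rfl := List.eq_of_mem_replicate hb'
      exact le_of_lt (hc _ hc')

-- flattening the list of emitted blocks
lemma pvFlatten_flatMap (r : List Int) (k : Int → Nat) (f : Int → Char) :
    (r.flatMap (fun c => if k c ≠ 0 then [List.replicate (k c) (f c)] else [])).flatten
      = r.flatMap (fun c => List.replicate (k c) (f c)) := by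
  induction r with
  | nil => simp
  | cons c t ih =>
    simp only [List.flatMap_cons, List.flatten_append, ih]
    by_cases h0 : k c = 0
    · simp [h0]
    · simp [h0]

-- ===== VERDICT (by name: the statement is the Claim_ definition above) =====
theorem solution_spec : Claim_equal_solution := by
  intro s hdom
  unfold Spec_solution solution solution_alt
  -- names
  set R : List Int := PySem.List.pyRange 126 (-1) (-1) with hRdef
  set codes : List Int := s.toList.map (fun ch => (ch.toNat : Int)) with hcodes
  -- A's accumulated ord list is `codes`
  rw [PySem.List.foldl_append_singleton_eq_map]
  simp only [List.nil_append]
  -- B's counter: getD c 0 = codes.count c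
  have hcnt : ∀ c : Int,
      (s.toList.foldl (fun d ch => d.insert ((ch.toNat : Int)) (d.getD ((ch.toNat : Int)) 0 + 1))
        PySem.Dict.empty).getD c 0 = (codes.count c : Int) := by
    intro c
    rw [hcodes,
      ← List.foldl_map (f := fun ch : Char => ((ch.toNat : Int)))
        (g := fun (d : PySem.Dict Int Int) (c : Int) => d.insert c (d.getD c 0 + 1)),
      PySem.Dict.getD_foldl_insert_add_one]
    simp [PySem.Dict.empty, PySem.Dict.getD, PySem.Dict.get?]
  -- every character code of s lies in the scan range
  have hmemR : ∀ v ∈ codes, v ∈ R := by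
    intro v hv
    rw [hcodes] at hv
    obtain ⟨ch, hch, rfl⟩ := List.mem_map.mp hv
    have hd : pvDomChar ch = true := by
      have := List.all_eq_true.mp hdom ch hch
      exact this
    have hlt : ch.toNat < 127 := by
      simp [pvDomChar] at hd; omega
    exact pvR_mem ch.toNat hlt
  -- rewrite B's loop body using the counter value
  have hbody : ∀ (acc : List (List Char)) (c : Int), c ∈ R →
      (let n := (s.toList.foldl (fun (d : PySem.Dict Int Int) ch => d.insert ((ch.toNat : Int)) (d.getD ((ch.toNat : Int)) 0 + 1))
            PySem.Dict.empty).getD c 0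
       if n ≠ 0 then acc ++ [List.replicate n.toNat (Char.ofNat c.toNat)] else acc)
      = acc ++ (if codes.count c ≠ 0 then [List.replicate (codes.count c) (Char.ofNat c.toNat)] else []) := by
    intro acc c _
    show (if _ ≠ 0 then _ else _) = _
    rw [hcnt c]
    by_cases h0 : codes.count c = 0
    · simp [h0]
    · simp [h0]
  rw [PySem.List.foldl_congr_mem R _ _ ([] : List (List Char)) hbody, PySem.List.foldl_append_eq_flatMap]
  simp only [List.nil_append]
  rw [pvFlatten_flatMap R (fun c => codes.count c) (fun c => Char.ofNat c.toNat)]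
  -- push the map chr out of B's side
  have hmapside :
      R.flatMap (fun c => List.replicate (codes.count c) (Char.ofNat c.toNat))
        = (R.flatMap (fun c => List.replicate (codes.count c) c)).map (fun n => Char.ofNat n.toNat) := by
    rw [List.map_flatMap]
    exact List.flatMap_congr (fun c _ => by simp [List.map_replicate])
  rw [hmapside, ← hcodes]
  congr 1
  -- the sorted list equals the counting-sort concatenation
  apply congrArg
  have hnodupR : R.Nodup := (pvR_sorted.imp (fun {a b} h => ne_of_gt h))
  have hperm : (PySem.List.sorted codes (fun x => x) true).Perm
      (R.flatMap (fun c => List.replicate (codes.count c) c)) := by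
    refine (PySem.List.sorted_perm codes (fun x => x) true).trans ?_
    refine (List.perm_iff_count).mpr ?_
    intro v
    rw [pvCount_flat R (fun c => codes.count c) hnodupR v]
    by_cases hv : v ∈ R
    · simp [hv]
    · have : v ∉ codes := fun hc => hv (hmemR v hc)
      simp [hv, List.count_eq_zero.mpr this]
  refine PySem.List.eq_of_perm_of_pairwise_le_of_injective (key := fun x : Int => -x)
    (fun a b h => neg_injective h) hperm ?_ ?_
  · exact (PySem.List.sorted_pairwise_rev codes (fun x => x)).imp (fun {a b} h => neg_le_neg h)
  · exact (pvPairwise_flat R (fun c => codes.count c) pvR_sorted).imp (fun {a b} h => neg_le_neg h)
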